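-- pv_equiv track=rewrite | github.com/shoark7/algorithm-with-python | problems_solving/baekjoon/no_1654_cutting_off_lan_wires.py | max_wire_length
-- ===== SOURCE A (Python) =====
-- def max_wire_length(arr, MIN_REQUIRED):
--     def number_of_wires(length):
--         return sum(n // length for n in arr)
--
--     def search_max_len(lo, hi):
--         if lo == hi:
--             return hi
--
--         mid = (lo + hi) // 2 + 1  # 이 코드가 핵심. 왜 1을 더할까요?
--         if number_of_wires(mid) >= MIN_REQUIRED:
--             return search_max_len(mid, hi)
--         else:
--             return search_max_len(lo, mid-1)
--
--     return search_max_len(1, max(arr))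
-- ===== SOURCE B (Python) =====
-- def max_wire_length(arr, MIN_REQUIRED):
--     def enough(length):
--         total = 0
--         for n in arr:
--             total += n // length
--         return total >= MIN_REQUIRED
--
--     lo, hi = 1, max(arr)
--     if hi < lo:
--         raise ValueError("need at least one wire of positive length")
--     while lo < hi:
--         mid = (lo + hi + 2) // 2
--         if enough(mid):
--             lo = mid
--         else:
--             hi = mid - 1
--     return lo
-- ===== Notes on version B (the rewrite author's own statement) =====
-- stated objective: simpler
-- what changed: The tail-recursive binary search with two nested closures is rewritten as a flat iterative while-loop over (lo, hi) with an explicit accumulation loop for the piece count, an upper-mid computed as (lo+hi+2)//2, and an explicit ValueError where the search space is empty (max(arr) < 1, where A blows the recursion limit).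
import Mathlib
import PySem

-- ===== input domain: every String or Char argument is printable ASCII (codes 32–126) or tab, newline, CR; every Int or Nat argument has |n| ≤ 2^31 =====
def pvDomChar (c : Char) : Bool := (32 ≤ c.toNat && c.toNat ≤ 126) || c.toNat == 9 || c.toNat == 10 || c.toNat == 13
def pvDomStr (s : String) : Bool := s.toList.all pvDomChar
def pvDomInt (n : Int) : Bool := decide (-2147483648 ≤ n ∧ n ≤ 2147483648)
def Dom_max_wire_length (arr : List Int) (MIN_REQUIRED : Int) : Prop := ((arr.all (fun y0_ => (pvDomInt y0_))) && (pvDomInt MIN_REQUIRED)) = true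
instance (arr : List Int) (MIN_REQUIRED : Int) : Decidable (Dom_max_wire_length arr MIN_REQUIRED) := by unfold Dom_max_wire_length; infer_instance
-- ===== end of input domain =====

-- B rewrites A's tail-recursive binary search (two nested closures) as a flat iterative
-- while-loop with an explicit accumulation loop for the piece count; on inputs with
-- max(arr) < 1 both fail to return (A exceeds the recursion limit, B raises ValueError).

-- ===== PORT A =====
-- helper number_of_wires: sum(n // length for n in arr)
def pyNumberOfWires (arr : List Int) (length : Int) : Int :=
  arr.foldl (fun s n => s + PySem.Int.floordiv n length) 0

-- helper search_max_len; Python diverges when lo > hi (unreachable from the entry call),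
-- the 'else hi' branch there merely totalizes the recursion (on lo = hi it is A's return hi).
-- termination measure fact for the midpoint (cited by name in decreasing_by)
theorem pvMidFact (lo hi : Int) (h : lo < hi) :
    (hi - (PySem.Int.floordiv (lo + hi) 2 + 1)).toNat < (hi - lo).toNat ∧
    ((PySem.Int.floordiv (lo + hi) 2 + 1) - 1 - lo).toNat < (hi - lo).toNat := by
  have := PySem.Int.floordiv_eq_ediv_of_pos (a := lo + hi) (b := 2) (by omega)
  rw [this]; omega

def pySearchMaxLen (arr : List Int) (MIN_REQUIRED : Int) (lo hi : Int) : Int :=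
  if h : lo < hi then
    let mid := PySem.Int.floordiv (lo + hi) 2 + 1
    if pyNumberOfWires arr mid ≥ MIN_REQUIRED then
      pySearchMaxLen arr MIN_REQUIRED mid hi
    else
      pySearchMaxLen arr MIN_REQUIRED lo (mid - 1)
  else hi
termination_by (hi - lo).toNat
decreasing_by
  · exact (pvMidFact lo hi h).1
  · exact (pvMidFact lo hi h).2

-- max(arr) raises on [] (outside Pre_); the port falls back to 0 there.
def max_wire_length (arr : List Int) (MIN_REQUIRED : Int) : Int :=
  pySearchMaxLen arr MIN_REQUIRED 1 ((PySem.List.max? arr (fun x => x)).getD 0)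

-- ===== PORT B =====
-- 'total = 0; for n in arr: total += n // length' of B's helper enough, tail-recursively
def bTotal (arr : List Int) (length total : Int) : Int :=
  match arr with
  | [] => total
  | n :: rest => bTotal rest length (total + PySem.Int.floordiv n length)

-- B's helper enough(length)
def bEnough (arr : List Int) (MIN_REQUIRED length : Int) : Bool :=
  MIN_REQUIRED ≤ bTotal arr length 0

-- the 'while lo < hi' loop, as fuel recursion; fuel = hi - lo iterations always suffice
def bLoop (arr : List Int) (MIN_REQUIRED : Int) : Nat → Int → Int → Int
  | 0, lo, _ => lo
  | fuel + 1, lo, hi =>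
    if lo < hi then
      let mid := PySem.Int.floordiv (lo + hi + 2) 2
      if bEnough arr MIN_REQUIRED mid then
        bLoop arr MIN_REQUIRED fuel mid hi
      else
        bLoop arr MIN_REQUIRED fuel lo (mid - 1)
    else lo

-- B raises ValueError when max(arr) < 1 (and max([]) raises); both are outside Pre_,
-- the port returns 0 there.
def max_wire_length_alt (arr : List Int) (MIN_REQUIRED : Int) : Int :=
  match PySem.List.max? arr (fun x => x) with
  | none => 0
  | some m => if m < 1 then 0 else bLoop arr MIN_REQUIRED (m - 1).toNat 1 m

-- ===== PRECONDITION & SPEC =====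
-- Pre_ excludes exactly the inputs on which Python A does not return: the empty list
-- (max([]) raises ValueError) and lists whose maximum is ≤ 0 (A's recursion never
-- terminates; B raises ValueError there).
def Pre_max_wire_length (arr : List Int) (MIN_REQUIRED : Int) : Prop :=
  1 ≤ (PySem.List.max? arr (fun x => x)).getD 0
instance (arr : List Int) (MIN_REQUIRED : Int) : Decidable (Pre_max_wire_length arr MIN_REQUIRED) := by unfold Pre_max_wire_length; infer_instance

def pvWitness_max_wire_length : List Int × Int := ([5, 3, 8], 4)

def Spec_max_wire_length (arr : List Int) (MIN_REQUIRED : Int) (out : Int) : Prop := out = max_wire_length_alt arr MIN_REQUIRED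
instance (arr : List Int) (MIN_REQUIRED : Int) (out : Int) : Decidable (Spec_max_wire_length arr MIN_REQUIRED out) := by unfold Spec_max_wire_length; infer_instance

-- ===== CLAIM (what is proved, stated in full; the proofs are below) =====
def Claim_equal_max_wire_length : Prop := ∀ (arr : List Int) (MIN_REQUIRED : Int), Dom_max_wire_length arr MIN_REQUIRED → Pre_max_wire_length arr MIN_REQUIRED → Spec_max_wire_length arr MIN_REQUIRED (max_wire_length arr MIN_REQUIRED)

-- ===== LEMMAS AND PROOFS =====

-- B's accumulation loop computes A's foldl sum
theorem bTotal_eq_fold (length : Int) :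
    ∀ (arr : List Int) (acc : Int),
      bTotal arr length acc = arr.foldl (fun s n => s + PySem.Int.floordiv n length) acc := by
  intro arr
  induction arr with
  | nil => intro acc; rfl
  | cons n rest ih => intro acc; simp [bTotal, List.foldl, ih]

-- with enough fuel (≥ hi - lo), B's loop from lo ≤ hi returns what A's recursion returns
theorem bLoop_eq_search (arr : List Int) (MIN_REQUIRED : Int) :
    ∀ (fuel : Nat) (lo hi : Int), 1 ≤ lo → lo ≤ hi → (hi - lo).toNat ≤ fuel →
      bLoop arr MIN_REQUIRED fuel lo hi = pySearchMaxLen arr MIN_REQUIRED lo hi := by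
  intro fuel
  induction fuel with
  | zero =>
    intro lo hi _ hle hf
    have : lo = hi := by omega
    rw [pySearchMaxLen]
    simp [bLoop, this]
  | succ fuel ih =>
    intro lo hi h1 hle hf
    rw [pySearchMaxLen, bLoop]
    by_cases hlt : lo < hi
    · simp only [if_pos hlt, dif_pos hlt]
      have hd1 := PySem.Int.floordiv_eq_ediv_of_pos (a := lo + hi) (b := 2) (by omega)
      have hd2 := PySem.Int.floordiv_eq_ediv_of_pos (a := lo + hi + 2) (b := 2) (by omega)
      have hmid : PySem.Int.floordiv (lo + hi + 2) 2 = PySem.Int.floordiv (lo + hi) 2 + 1 := by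
        rw [hd1, hd2]; omega
      set mid := PySem.Int.floordiv (lo + hi) 2 + 1 with hmdef
      have hmlo : lo < mid := by rw [hmdef, hd1]; omega
      have hmhi : mid ≤ hi := by rw [hmdef, hd1]; omega
      have hcnt : bEnough arr MIN_REQUIRED mid = decide (pyNumberOfWires arr mid ≥ MIN_REQUIRED) := by
        simp [bEnough, pyNumberOfWires, bTotal_eq_fold, ge_iff_le]
      rw [hmid]
      by_cases hc : pyNumberOfWires arr mid ≥ MIN_REQUIRED
      · rw [if_pos hc, if_pos (by rw [hcnt]; simpa using hc)]
        exact ih mid hi (by omega) (by omega) (by omega)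
      · rw [if_neg hc, if_neg (by rw [hcnt]; simpa using hc)]
        exact ih lo (mid - 1) (by omega) (by omega) (by omega)
    · rw [if_neg hlt, dif_neg hlt]; omega

-- ===== VERDICT (by name: the statement is the Claim_ definition above) =====
theorem max_wire_length_spec : Claim_equal_max_wire_length := by
  intro arr MIN_REQUIRED _ hpre
  unfold Pre_max_wire_length at hpre
  unfold Spec_max_wire_length max_wire_length max_wire_length_alt
  cases hmx : PySem.List.max? arr (fun x => x) with
  | none => rw [hmx] at hpre; simp at hpre
  | some m =>
    rw [hmx] at hpre
    simp only [Option.getD_some] at hpre ⊢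
    show pySearchMaxLen arr MIN_REQUIRED 1 m =
      if m < 1 then 0 else bLoop arr MIN_REQUIRED (m - 1).toNat 1 m
    rw [if_neg (by omega)]
    exact (bLoop_eq_search arr MIN_REQUIRED (m - 1).toNat 1 m (by omega) hpre (by omega)).symm
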